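-- pv_equiv track=rewrite | github.com/TakaIshikawa/blueprint | src/blueprint/task_sequencing_constraints.py | _depths_by_task_id
-- ===== SOURCE A (Python) =====
-- def _depths_by_task_id(
--     dependencies_by_task_id: dict[str, tuple[str, ...]],
-- ) -> dict[str, int]:
--     depths: dict[str, int] = {}
--     visiting: set[str] = set()
--
--     def depth_for(task_id: str) -> int:
--         if task_id in depths:
--             return depths[task_id]
--         if task_id in visiting:
--             depths[task_id] = 0
--             return 0
--
--         visiting.add(task_id)
--         dependencies = dependencies_by_task_id.get(task_id, ())
--         depth = max((depth_for(dependency_id) for dependency_id in dependencies), default=-1) + 1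
--         visiting.remove(task_id)
--         depths[task_id] = depth
--         return depth
--
--     for task_id in dependencies_by_task_id:
--         depth_for(task_id)
--     return depths
-- ===== SOURCE B (Python) =====
-- def _depths_by_task_id(
--     dependencies_by_task_id: dict[str, tuple[str, ...]],
-- ) -> dict[str, int]:
--     depths: dict[str, int] = {}
--     visiting: set[str] = set()
--
--     for root_id in dependencies_by_task_id:
--         if root_id in depths:
--             continue
--         visiting.add(root_id)
--         stack = [(root_id, 0, -1)]
--         while stack:
--             task_id, idx, acc = stack[-1]
--             dependencies = dependencies_by_task_id.get(task_id, ())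
--             if idx == len(dependencies):
--                 stack.pop()
--                 visiting.remove(task_id)
--                 depths[task_id] = acc + 1
--                 continue
--             dependency_id = dependencies[idx]
--             if dependency_id in depths:
--                 stack[-1] = (task_id, idx + 1, max(acc, depths[dependency_id]))
--             elif dependency_id in visiting:
--                 depths[dependency_id] = 0
--                 stack[-1] = (task_id, idx + 1, max(acc, 0))
--             else:
--                 visiting.add(dependency_id)
--                 stack.append((dependency_id, 0, -1))
--     return depths
-- ===== Notes on version B (the rewrite author's own statement) =====
-- stated objective: alternative
-- what changed: The memoized recursive DFS (nested depth_for with Python-level recursion and max over a generator) is replaced by an iterative DFS with an explicit stack of (task, dependency-index, accumulator) frames, reproducing the exact memoization order including the back-edge-as-0 treatment on cycles.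
import Mathlib
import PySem

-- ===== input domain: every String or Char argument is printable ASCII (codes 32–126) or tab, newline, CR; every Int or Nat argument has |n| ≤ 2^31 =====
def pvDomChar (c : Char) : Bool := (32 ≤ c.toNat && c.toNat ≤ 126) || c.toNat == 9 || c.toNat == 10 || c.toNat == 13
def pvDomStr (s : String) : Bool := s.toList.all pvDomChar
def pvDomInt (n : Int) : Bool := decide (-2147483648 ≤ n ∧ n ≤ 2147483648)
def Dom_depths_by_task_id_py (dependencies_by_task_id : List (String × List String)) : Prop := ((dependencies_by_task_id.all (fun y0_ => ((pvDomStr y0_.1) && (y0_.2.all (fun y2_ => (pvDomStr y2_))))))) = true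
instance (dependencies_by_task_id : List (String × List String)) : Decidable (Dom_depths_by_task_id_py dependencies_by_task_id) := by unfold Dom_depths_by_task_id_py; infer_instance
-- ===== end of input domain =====

-- B replaces A's memoized recursive DFS by an iterative DFS over an explicit stack of
-- (task, dependency-index, accumulator) frames; same memoization order, including cycles.

-- ===== PORT A =====

-- dependencies_by_task_id.get(t, ())
def pvGet (l : List (String × List String)) (t : String) : List String :=
  (PySem.Dict.mk l).getD t []

-- finite universe of all ids mentioned (keys and dependencies); used only to size A's fuel
def pvU (l : List (String × List String)) : List String :=
  l.map Prod.fst ++ (l.map Prod.snd).flatten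

-- one iteration of Python's max(...) generator over the dependencies, threading (depths, visiting)
def pvStepA (step : String → PySem.Dict String Int → PySem.Set String → Int × PySem.Dict String Int × PySem.Set String)
    (st : Int × PySem.Dict String Int × PySem.Set String) (d : String) :
    Int × PySem.Dict String Int × PySem.Set String :=
  let c := step d st.2.1 st.2.2
  (max st.1 c.1, c.2.1, c.2.2)

-- depth_for, with a fuel parameter making the Python-level recursion structural.  The fuel
-- used below (pvF) exceeds the maximal recursion depth (each nested call adds a fresh id of
-- pvU to `visiting`), so the fuel-0 arm is unreachable.
def pvDepthForA (l : List (String × List String)) :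
    Nat → String → PySem.Dict String Int → PySem.Set String →
    Int × PySem.Dict String Int × PySem.Set String
  | f, t, dep, vis =>
    if dep.contains t then (dep.getD t 0, dep, vis)       -- return depths[task_id] (present)
    else if PySem.Set.contains vis t then (0, dep.insert t 0, vis)
    else
      match f with
      | 0 => (0, dep.insert t 0, vis)                     -- unreachable fuel guard
      | g + 1 =>
        let r := (pvGet l t).foldl (pvStepA fun d dp vs => pvDepthForA l g d dp vs) (-1, dep, PySem.Set.add vis t)
        -- visiting.remove: t was just added, so Python's .remove never raises; discard is exact
        (r.1 + 1, r.2.1.insert t (r.1 + 1), PySem.Set.discard r.2.2 t)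

def pvF (l : List (String × List String)) : Nat := (pvU l).length + 1

def depths_by_task_id_py (dependencies_by_task_id : List (String × List String)) : List (String × Int) :=
  ((dependencies_by_task_id.foldl
      (fun (st : PySem.Dict String Int × PySem.Set String) kv =>
        let r := pvDepthForA dependencies_by_task_id (pvF dependencies_by_task_id) kv.1 st.1 st.2
        (r.2.1, r.2.2))
      (PySem.Dict.empty, PySem.Set.empty))).1.items

-- ===== PORT B =====

-- termination helpers for the explicit-stack loop (proof artifacts, not part of Source B's logic)
def pvAvail (l : List (String × List String)) (dep : PySem.Dict String Int)
    (vis : PySem.Set String) : Nat :=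
  (pvU l).countP (fun x => !(dep.contains x) && !(PySem.Set.contains vis x))

def pvWeight (l : List (String × List String)) (stack : List (String × Nat × Int)) : Nat :=
  (stack.map (fun fr => 2 + ((pvGet l fr.1).length - fr.2.1))).sum

theorem pvCountP_lt {α : Type} (p q : α → Bool) (l : List α) (d : α) (hd : d ∈ l)
    (hpq : ∀ a ∈ l, p a = true → q a = true) (hqd : q d = true) (hpd : p d = false) :
    l.countP p < l.countP q := by
  induction l with
  | nil => cases hd
  | cons a tl ih =>
    rw [List.countP_cons, List.countP_cons]
    rcases List.mem_cons.mp hd with rfl | hd'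
    · have hle := List.countP_mono_left (l := tl) (fun a ha h => hpq a (List.mem_cons_of_mem _ ha) h)
      have e1 : (if (true = true) then (1 : Nat) else 0) = 1 := rfl
      have e2 : (if (false = true) then (1 : Nat) else 0) = 0 := rfl
      rw [hqd, hpd, e1, e2]
      omega
    · have h1 : (if p a = true then (1 : Nat) else 0) ≤ (if q a = true then 1 else 0) := by
        by_cases h : p a = true
        · rw [if_pos h, if_pos (hpq a List.mem_cons_self h)]
        · rw [if_neg h]; exact Nat.zero_le _
      have := ih hd' (fun a ha h => hpq a (List.mem_cons_of_mem _ ha) h)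
      omega

theorem pvAvail_mono {l : List (String × List String)} {dep dep' : PySem.Dict String Int}
    {vis : PySem.Set String}
    (h : ∀ k, dep.contains k = true → dep'.contains k = true) :
    pvAvail l dep' vis ≤ pvAvail l dep vis := by
  apply List.countP_mono_left
  intro a _ ha
  simp only [Bool.and_eq_true, Bool.not_eq_true'] at ha ⊢
  refine ⟨?_, ha.2⟩
  by_cases hc : dep.contains a = true
  · have := h a hc; rw [this] at ha; exact absurd ha.1 (by simp)
  · simpa using hc

theorem pvAvail_insert_le (l : List (String × List String)) (dep : PySem.Dict String Int)
    (vis : PySem.Set String) (k : String) (v : Int) :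
    pvAvail l (dep.insert k v) vis ≤ pvAvail l dep vis :=
  pvAvail_mono (fun k' hk' => by
    rw [PySem.Dict.contains_insert]; simp [hk'])

theorem pvAvail_pop_le (l : List (String × List String)) (dep : PySem.Dict String Int)
    (vis : PySem.Set String) (t : String) (v : Int) :
    pvAvail l (dep.insert t v) (PySem.Set.discard vis t) ≤ pvAvail l dep vis := by
  apply List.countP_mono_left
  intro a _ ha
  simp only [Bool.and_eq_true, Bool.not_eq_true'] at ha ⊢
  rw [PySem.Dict.contains_insert] at ha
  rcases ha with ⟨h1, h2⟩
  simp only [Bool.or_eq_false_iff] at h1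
  refine ⟨h1.2, ?_⟩
  simp only [PySem.Set.contains_eq_listContains, ← Bool.not_eq_true, List.contains_iff_mem] at h2 ⊢
  intro hmem
  refine h2 ((PySem.Set.mem_discard vis t a).mpr ⟨hmem, ?_⟩)
  intro rfl_eq
  subst rfl_eq
  exact absurd h1.1 (by simp)

theorem pvAvail_add_lt {l : List (String × List String)} {dep : PySem.Dict String Int}
    {vis : PySem.Set String} {d : String}
    (hU : d ∈ pvU l) (hd : dep.contains d = false) (hv : PySem.Set.contains vis d = false) :
    pvAvail l dep (PySem.Set.add vis d) < pvAvail l dep vis := by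
  apply pvCountP_lt _ _ _ d hU
  · intro a _ ha
    simp only [Bool.and_eq_true, Bool.not_eq_true'] at ha ⊢
    refine ⟨ha.1, ?_⟩
    simp only [PySem.Set.contains_eq_listContains, ← Bool.not_eq_true, List.contains_iff_mem] at ha ⊢
    intro hmem
    exact ha.2 ((PySem.Set.mem_add vis d a).mpr (Or.inl hmem))
  · simp only [Bool.and_eq_true, Bool.not_eq_true']
    exact ⟨hd, by simpa using hv⟩
  · have hm : d ∈ PySem.Set.add vis d := (PySem.Set.mem_add vis d d).mpr (Or.inr rfl)
    simp [hm]

theorem pvGet_mem_U {l : List (String × List String)} {t x : String}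
    (h : x ∈ pvGet l t) : x ∈ pvU l := by
  unfold pvGet PySem.Dict.getD PySem.Dict.get? at h
  cases hf : List.find? (fun p => p.1 == t) (PySem.Dict.mk l).items with
  | none => rw [hf] at h; simp at h
  | some p =>
    rw [hf] at h; simp at h
    have hp : p ∈ l := List.mem_of_find?_eq_some hf
    unfold pvU
    refine List.mem_append_right _ ?_
    exact List.mem_flatten.mpr ⟨p.2, List.mem_map.mpr ⟨p, hp, rfl⟩, h⟩

-- the explicit-stack loop of Source B: frames are (task_id, idx, acc)
def pvRunB (l : List (String × List String)) (stack : List (String × Nat × Int))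
    (dep : PySem.Dict String Int) (vis : PySem.Set String) :
    PySem.Dict String Int × PySem.Set String :=
  match stack with
  | [] => (dep, vis)
  | (t, idx, acc) :: rest =>
    -- dependencies = dependencies_by_task_id.get(task_id, ()) is pvGet l t
    if h : idx < (pvGet l t).length then
      if dep.contains (pvGet l t)[idx] then
        pvRunB l ((t, idx + 1, max acc (dep.getD (pvGet l t)[idx] 0)) :: rest) dep vis
      else if PySem.Set.contains vis (pvGet l t)[idx] then
        pvRunB l ((t, idx + 1, max acc 0) :: rest) (dep.insert (pvGet l t)[idx] 0) vis
      else
        pvRunB l (((pvGet l t)[idx], 0, -1) :: (t, idx, acc) :: rest) dep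
          (PySem.Set.add vis (pvGet l t)[idx])
    else
      -- visiting.remove(task_id): task_id is always in visiting here, discard is exact
      pvRunB l rest (dep.insert t (acc + 1)) (PySem.Set.discard vis t)
  termination_by (pvAvail l dep vis, pvWeight l stack)
  decreasing_by
  · apply Prod.Lex.right
    simp only [pvWeight, List.map_cons, List.sum_cons]
    omega
  · rcases lt_or_eq_of_le (pvAvail_insert_le l dep vis (pvGet l t)[idx] 0) with hlt | heq
    · exact Prod.Lex.left _ _ hlt
    · rw [heq]; apply Prod.Lex.right
      simp only [pvWeight, List.map_cons, List.sum_cons]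
      omega
  · exact Prod.Lex.left _ _
      (pvAvail_add_lt (pvGet_mem_U (List.getElem_mem h)) (by simp_all) (by simp_all))
  · rcases lt_or_eq_of_le (pvAvail_pop_le l dep vis t (acc + 1)) with hlt | heq
    · exact Prod.Lex.left _ _ hlt
    · rw [heq]; apply Prod.Lex.right
      simp only [pvWeight, List.map_cons, List.sum_cons]
      omega

def depths_by_task_id_py_alt (dependencies_by_task_id : List (String × List String)) : List (String × Int) :=
  ((dependencies_by_task_id.foldl
      (fun (st : PySem.Dict String Int × PySem.Set String) kv =>
        if st.1.contains kv.1 then st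
        else pvRunB dependencies_by_task_id [(kv.1, 0, -1)] st.1 (PySem.Set.add st.2 kv.1))
      (PySem.Dict.empty, PySem.Set.empty))).1.items

-- ===== PRECONDITION & SPEC =====
def Spec_depths_by_task_id_py (dependencies_by_task_id : List (String × List String)) (out : List (String × Int)) : Prop := out = depths_by_task_id_py_alt dependencies_by_task_id
instance (dependencies_by_task_id : List (String × List String)) (out : List (String × Int)) : Decidable (Spec_depths_by_task_id_py dependencies_by_task_id out) := by unfold Spec_depths_by_task_id_py; infer_instance

-- ===== CLAIM (what is proved, stated in full; the proofs are below) =====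
def Claim_equal_depths_by_task_id_py : Prop := ∀ (dependencies_by_task_id : List (String × List String)), Dom_depths_by_task_id_py dependencies_by_task_id → Spec_depths_by_task_id_py dependencies_by_task_id (depths_by_task_id_py dependencies_by_task_id)

-- ===== LEMMAS AND PROOFS =====

theorem pvDiscard_add {vis : PySem.Set String} {t : String} (h : t ∉ vis) :
    PySem.Set.discard (PySem.Set.add vis t) t = vis := by
  rw [PySem.Set.add_of_not_mem h]
  show List.filter _ _ = _
  rw [List.filter_append]
  have h2 : List.filter (fun y => !(y == t)) [t] = [] := by simp
  have h1 : List.filter (fun y => !(y == t)) vis = vis := by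
    apply List.filter_eq_self.mpr
    intro y hy
    simp only [Bool.not_eq_true', beq_eq_false_iff_ne, ne_eq]
    intro heq
    exact h (heq ▸ hy)
  rw [h1, h2, List.append_nil]

-- branch equations of depth_for
theorem depthForA_memo (l : List (String × List String)) (f : Nat) {t : String}
    {dep : PySem.Dict String Int} {vis : PySem.Set String} (h : dep.contains t = true) :
    pvDepthForA l f t dep vis = (dep.getD t 0, dep, vis) := by
  cases f <;> simp [pvDepthForA, h]

theorem depthForA_cycle (l : List (String × List String)) (f : Nat) {t : String}
    {dep : PySem.Dict String Int} {vis : PySem.Set String}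
    (h1 : dep.contains t = false) (h2 : t ∈ vis) :
    pvDepthForA l f t dep vis = (0, dep.insert t 0, vis) := by
  cases f <;> simp [pvDepthForA, h1, h2]

theorem depthForA_zero (l : List (String × List String)) {t : String}
    {dep : PySem.Dict String Int} {vis : PySem.Set String}
    (h1 : dep.contains t = false) (h2 : t ∉ vis) :
    pvDepthForA l 0 t dep vis = (0, dep.insert t 0, vis) := by
  simp [pvDepthForA, h1, h2]

theorem depthForA_main (l : List (String × List String)) (g : Nat) {t : String}
    {dep : PySem.Dict String Int} {vis : PySem.Set String}
    (h1 : dep.contains t = false) (h2 : t ∉ vis) :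
    pvDepthForA l (g + 1) t dep vis
      = (((pvGet l t).foldl (pvStepA fun d dp vs => pvDepthForA l g d dp vs) (-1, dep, PySem.Set.add vis t)).1 + 1,
         ((pvGet l t).foldl (pvStepA fun d dp vs => pvDepthForA l g d dp vs) (-1, dep, PySem.Set.add vis t)).2.1.insert t
           (((pvGet l t).foldl (pvStepA fun d dp vs => pvDepthForA l g d dp vs) (-1, dep, PySem.Set.add vis t)).1 + 1),
         PySem.Set.discard ((pvGet l t).foldl (pvStepA fun d dp vs => pvDepthForA l g d dp vs) (-1, dep, PySem.Set.add vis t)).2.2 t) := by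
  simp [pvDepthForA, h1, h2]

-- postconditions of depth_for: visiting is restored, depths grows, and the returned value
-- is memoized for the argument
theorem pvPostA (l : List (String × List String)) :
    ∀ (f : Nat) (t : String) (dep : PySem.Dict String Int) (vis : PySem.Set String),
      (pvDepthForA l f t dep vis).2.2 = vis
      ∧ (∀ k, dep.contains k = true → (pvDepthForA l f t dep vis).2.1.contains k = true)
      ∧ (pvDepthForA l f t dep vis).2.1.contains t = true
      ∧ (pvDepthForA l f t dep vis).2.1.getD t 0 = (pvDepthForA l f t dep vis).1 := by
  have insert_facts : ∀ (dep : PySem.Dict String Int) (t : String) (v : Int),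
      (∀ k, dep.contains k = true → (dep.insert t v).contains k = true)
      ∧ (dep.insert t v).contains t = true ∧ (dep.insert t v).getD t 0 = v := by
    intro dep t v
    refine ⟨fun k hk => ?_, PySem.Dict.contains_insert_self _ _ _, PySem.Dict.getD_insert_self _ _ _ _⟩
    rw [PySem.Dict.contains_insert]
    simp [hk]
  intro f
  induction f with
  | zero =>
    intro t dep vis
    by_cases h1 : dep.contains t = true
    · rw [depthForA_memo l 0 h1]; exact ⟨rfl, fun k hk => hk, h1, rfl⟩
    · have h1' : dep.contains t = false := by simpa using h1
      by_cases h2 : t ∈ vis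
      · rw [depthForA_cycle l 0 h1' h2]
        exact ⟨rfl, (insert_facts dep t 0).1, (insert_facts dep t 0).2.1, (insert_facts dep t 0).2.2⟩
      · rw [depthForA_zero l h1' h2]
        exact ⟨rfl, (insert_facts dep t 0).1, (insert_facts dep t 0).2.1, (insert_facts dep t 0).2.2⟩
  | succ g ih =>
    intro t dep vis
    by_cases h1 : dep.contains t = true
    · rw [depthForA_memo l (g + 1) h1]; exact ⟨rfl, fun k hk => hk, h1, rfl⟩
    · have h1' : dep.contains t = false := by simpa using h1
      by_cases h2 : t ∈ vis
      · rw [depthForA_cycle l (g + 1) h1' h2]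
        exact ⟨rfl, (insert_facts dep t 0).1, (insert_facts dep t 0).2.1, (insert_facts dep t 0).2.2⟩
      · have hfold : ∀ (ds : List String) (st : Int × PySem.Dict String Int × PySem.Set String),
            (ds.foldl (pvStepA fun d dp vs => pvDepthForA l g d dp vs) st).2.2 = st.2.2
            ∧ (∀ k, st.2.1.contains k = true →
                (ds.foldl (pvStepA fun d dp vs => pvDepthForA l g d dp vs) st).2.1.contains k = true) := by
          intro ds
          induction ds with
          | nil => intro st; exact ⟨rfl, fun k hk => hk⟩
          | cons d tl ihd =>
            intro st
            rcases ih d st.2.1 st.2.2 with ⟨hv, hm, _, _⟩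
            rcases ihd (pvStepA (fun d dp vs => pvDepthForA l g d dp vs) st d) with ⟨hv', hm'⟩
            constructor
            · rw [List.foldl_cons, hv']
              exact hv
            · intro k hk
              rw [List.foldl_cons]
              exact hm' k (hm k hk)
        rw [depthForA_main l g h1' h2]
        rcases hfold (pvGet l t) (-1, dep, PySem.Set.add vis t) with ⟨hv, hm⟩
        refine ⟨?_, fun k hk => ?_, ?_, ?_⟩
        · show PySem.Set.discard _ t = vis
          rw [hv]
          exact pvDiscard_add h2
        · exact ((insert_facts _ t _).1) k (hm k hk)
        · exact (insert_facts _ t _).2.1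
        · exact (insert_facts _ t _).2.2

-- core simulation: pushing a fresh task's frame runs the machine exactly through what
-- depth_for computes for it, given enough fuel
theorem pvSimPush (l : List (String × List String)) :
    ∀ (f : Nat) (t : String) (dep : PySem.Dict String Int) (vis : PySem.Set String)
      (stack : List (String × Nat × Int)),
      t ∈ pvU l → dep.contains t = false → PySem.Set.contains vis t = false →
      pvAvail l dep vis < f →
      pvRunB l ((t, 0, -1) :: stack) dep (PySem.Set.add vis t)
        = pvRunB l stack (pvDepthForA l f t dep vis).2.1 (pvDepthForA l f t dep vis).2.2 := by
  intro f
  induction f with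
  | zero => intro t dep vis stack _ _ _ h; omega
  | succ g ih =>
    intro t dep vis stack htU hdep hvis havail
    have key : ∀ (n idx : Nat) (acc : Int) (dcur : PySem.Dict String Int) (vcur : PySem.Set String),
        (pvGet l t).length - idx = n →
        pvAvail l dcur vcur < g ∨ (pvGet l t).length ≤ idx →
        pvRunB l ((t, idx, acc) :: stack) dcur vcur
          = pvRunB l stack
              ((((pvGet l t).drop idx).foldl (pvStepA fun d dp vs => pvDepthForA l g d dp vs) (acc, dcur, vcur)).2.1.insert t
                ((((pvGet l t).drop idx).foldl (pvStepA fun d dp vs => pvDepthForA l g d dp vs) (acc, dcur, vcur)).1 + 1))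
              (PySem.Set.discard
                ((((pvGet l t).drop idx).foldl (pvStepA fun d dp vs => pvDepthForA l g d dp vs) (acc, dcur, vcur)).2.2) t) := by
      intro n
      induction n with
      | zero =>
        intro idx acc dcur vcur hn _
        have hge : (pvGet l t).length ≤ idx := by omega
        rw [List.drop_eq_nil_of_le hge]
        rw [pvRunB]
        simp only [List.foldl_nil]
        rw [dif_neg (by omega)]
      | succ m ihn =>
        intro idx acc dcur vcur hn hav
        have hlt : idx < (pvGet l t).length := by omega
        have hav' : pvAvail l dcur vcur < g := by
          rcases hav with h | h
          · exact h
          · omega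
        rw [List.drop_eq_getElem_cons hlt, List.foldl_cons]
        by_cases hc1 : dcur.contains (pvGet l t)[idx] = true
        · rw [pvRunB]
          rw [dif_pos hlt, if_pos hc1]
          have hstep : pvStepA (fun d dp vs => pvDepthForA l g d dp vs) (acc, dcur, vcur) (pvGet l t)[idx]
              = (max acc (dcur.getD (pvGet l t)[idx] 0), dcur, vcur) := by
            show (max acc (pvDepthForA l g (pvGet l t)[idx] dcur vcur).1,
                  (pvDepthForA l g (pvGet l t)[idx] dcur vcur).2.1,
                  (pvDepthForA l g (pvGet l t)[idx] dcur vcur).2.2) = _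
            rw [depthForA_memo l g hc1]
          rw [hstep]
          exact ihn (idx + 1) _ dcur vcur (by omega) (Or.inl hav')
        · have hc1' : dcur.contains (pvGet l t)[idx] = false := by simpa using hc1
          by_cases hc2 : PySem.Set.contains vcur (pvGet l t)[idx] = true
          · have hc2m : (pvGet l t)[idx] ∈ vcur := by simpa using hc2
            rw [pvRunB]
            rw [dif_pos hlt, if_neg (by exact hc1), if_pos hc2]
            have hstep : pvStepA (fun d dp vs => pvDepthForA l g d dp vs) (acc, dcur, vcur) (pvGet l t)[idx]
                = (max acc 0, dcur.insert (pvGet l t)[idx] 0, vcur) := by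
              show (max acc (pvDepthForA l g (pvGet l t)[idx] dcur vcur).1,
                    (pvDepthForA l g (pvGet l t)[idx] dcur vcur).2.1,
                    (pvDepthForA l g (pvGet l t)[idx] dcur vcur).2.2) = _
              rw [depthForA_cycle l g hc1' hc2m]
            rw [hstep]
            refine ihn (idx + 1) _ _ vcur (by omega) (Or.inl ?_)
            have := pvAvail_insert_le l dcur vcur (pvGet l t)[idx] 0
            omega
          · -- fresh dependency: push, recurse via ih, resume and read the memoized value
            have hc2' : PySem.Set.contains vcur (pvGet l t)[idx] = false := by simpa using hc2
            have hdU : (pvGet l t)[idx] ∈ pvU l := pvGet_mem_U (List.getElem_mem hlt)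
            rw [pvRunB]
            rw [dif_pos hlt, if_neg (by exact hc1), if_neg (by exact hc2)]
            rw [ih (pvGet l t)[idx] dcur vcur ((t, idx, acc) :: stack) hdU hc1' hc2' hav']
            rcases pvPostA l g (pvGet l t)[idx] dcur vcur with ⟨hv, hm, hcont, hmemo⟩
            rw [pvRunB]
            rw [dif_pos hlt, if_pos hcont]
            have hstep : pvStepA (fun d dp vs => pvDepthForA l g d dp vs) (acc, dcur, vcur) (pvGet l t)[idx]
                = (max acc (pvDepthForA l g (pvGet l t)[idx] dcur vcur).1,
                   (pvDepthForA l g (pvGet l t)[idx] dcur vcur).2.1,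
                   (pvDepthForA l g (pvGet l t)[idx] dcur vcur).2.2) := rfl
            rw [hstep]
            rw [hmemo]
            have hav2 : pvAvail l (pvDepthForA l g (pvGet l t)[idx] dcur vcur).2.1
                (pvDepthForA l g (pvGet l t)[idx] dcur vcur).2.2 < g := by
              have := pvAvail_mono (l := l) (vis := vcur) hm
              rw [hv]
              omega
            have := ihn (idx + 1) (max acc (pvDepthForA l g (pvGet l t)[idx] dcur vcur).1)
              (pvDepthForA l g (pvGet l t)[idx] dcur vcur).2.1
              (pvDepthForA l g (pvGet l t)[idx] dcur vcur).2.2 (by omega) (Or.inl hav2)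
            rw [hv] at this ⊢
            exact this
    have havle : pvAvail l dep vis ≤ g := by omega
    have havadd : pvAvail l dep (PySem.Set.add vis t) < pvAvail l dep vis :=
      pvAvail_add_lt htU hdep hvis
    have hmain : pvDepthForA l (g + 1) t dep vis
        = (((pvGet l t).foldl (pvStepA fun d dp vs => pvDepthForA l g d dp vs) (-1, dep, PySem.Set.add vis t)).1 + 1,
           ((pvGet l t).foldl (pvStepA fun d dp vs => pvDepthForA l g d dp vs) (-1, dep, PySem.Set.add vis t)).2.1.insert t
             (((pvGet l t).foldl (pvStepA fun d dp vs => pvDepthForA l g d dp vs) (-1, dep, PySem.Set.add vis t)).1 + 1),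
           PySem.Set.discard ((pvGet l t).foldl (pvStepA fun d dp vs => pvDepthForA l g d dp vs) (-1, dep, PySem.Set.add vis t)).2.2 t) :=
      depthForA_main l g hdep (by simpa using hvis)
    rw [hmain]
    have := key ((pvGet l t).length) 0 (-1) dep (PySem.Set.add vis t) (by omega) (Or.inl (by omega))
    simpa using this

-- top level: both programs fold the same per-key transformation over the keys
theorem pvTop (l : List (String × List String)) :
    ∀ (es : List (String × List String)) (dep : PySem.Dict String Int),
      (∀ e ∈ es, e.1 ∈ l.map Prod.fst) →
      (es.foldl
          (fun (st : PySem.Dict String Int × PySem.Set String) kv =>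
            let r := pvDepthForA l (pvF l) kv.1 st.1 st.2
            (r.2.1, r.2.2)) (dep, PySem.Set.empty))
        = (es.foldl
            (fun (st : PySem.Dict String Int × PySem.Set String) kv =>
              if st.1.contains kv.1 then st
              else pvRunB l [(kv.1, 0, -1)] st.1 (PySem.Set.add st.2 kv.1))
            (dep, PySem.Set.empty)) := by
  intro es
  induction es with
  | nil => intro dep _; rfl
  | cons kv tl ih =>
    intro dep hmem
    have hkey : kv.1 ∈ l.map Prod.fst := hmem kv (List.mem_cons_self)
    have htl : ∀ e ∈ tl, e.1 ∈ l.map Prod.fst := fun e he => hmem e (List.mem_cons_of_mem _ he)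
    simp only [List.foldl_cons]
    by_cases hc : dep.contains kv.1 = true
    · have hA : pvDepthForA l (pvF l) kv.1 dep PySem.Set.empty = (dep.getD kv.1 0, dep, PySem.Set.empty) := by
        cases hf : pvF l <;> simp [pvDepthForA, hc]
      rw [hA, if_pos hc]
      exact ih dep htl
    · have hc' : dep.contains kv.1 = false := by simpa using hc
      have hvis : PySem.Set.contains (PySem.Set.empty : PySem.Set String) kv.1 = false := by
        simp [PySem.Set.empty]
      have htU : kv.1 ∈ pvU l := List.mem_append_left _ hkey
      have havail : pvAvail l dep PySem.Set.empty < pvF l := by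
        have := List.countP_le_length
          (p := fun x => !(dep.contains x) && !(PySem.Set.contains (PySem.Set.empty : PySem.Set String) x))
          (l := pvU l)
        unfold pvAvail pvF
        omega
      have hsim := pvSimPush l (pvF l) kv.1 dep PySem.Set.empty [] htU hc' hvis havail
      rw [pvRunB] at hsim
      rcases pvPostA l (pvF l) kv.1 dep PySem.Set.empty with ⟨hv, _, _, _⟩
      rw [if_neg (by simp [hc]), hsim, hv]
      exact ih _ htl

-- ===== VERDICT (by name: the statement is the Claim_ definition above) =====
theorem depths_by_task_id_py_spec : Claim_equal_depths_by_task_id_py := by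
  intro l _
  unfold Spec_depths_by_task_id_py depths_by_task_id_py depths_by_task_id_py_alt
  have := pvTop l l PySem.Dict.empty
    (fun e he => List.mem_map.mpr ⟨e, he, rfl⟩)
  rw [this]
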